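-- pv_equiv track=rewrite | github.com/dicer0/p_Python_ESP | a1.-Data Science/24.1.-Ejercicios Estructuras de Datos.py | subcadenas_vocales
-- ===== SOURCE A (Python) =====
-- def subcadenas_vocales(pattern, source):
--     vocales = {"a","e","i","o","u","y"}
--     contador = 0
--     for i in range(len(source) - len(pattern) + 1): #7-3+1 = 4+1 = 5 posibles subcadenas, recorriendo de 1 en 1 todas sus letras.
--         cumple = True                               #Booleano, que suma 1 a 1 cuando las letras de la subcadena cumplan el patrón.
--         for j in range(len(pattern)):               #Bucle que recorre los números del patrón para compararlos con las letras de las subcadenas.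
--             letra = source[i + j]                   #Bucle que avanza de 1 en 1 los caracteres de source, para crear las subcadenas.
--             if(pattern[j] == "0"):
--                 if(letra not in vocales):           #Si el caracter del patrón es 0 pero la letra no es una vocal, cumple = False.
--                     cumple = False
--                     #- continue: Comando que interrumpe la iteración actual del condicional o bucle y salta inmediatamente a la siguiente
--                     #  vuelta, sin ejecutar el resto del código.
--                     #- break: Comando que rompe completamente el condicional o bucle donde está contenido.
--                     #- pass: Comando que no hace nada, sirve para cuando Python exige al menos una instrucción dentro del bloque.
--                     break
--             if(pattern[j] == "1" and letra in vocales): #Si el caracter del patrón es 1 pero la letra es una vocal, cumple = False.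
--                 cumple = False
--                 break
--         if(cumple == True):                         #Cada vez que la bandera cumple sea True, es porque la subcadena de source cumplió pattern.
--             contador += 1                           #Y esto aumenta al contador.
--     return contador
-- ===== SOURCE B (Python) =====
-- def subcadenas_vocales(pattern, source):
--     # Bit-parallel window test: translate source once into a vowel/consonant
--     # bitstring packed into one big integer, compile the pattern once into the
--     # 'must be vowel' / 'must be consonant' bitmasks, then each window is
--     # checked with two whole-mask integer comparisons (word-parallel) instead
--     # of a per-character scan.
--     vowels = {"a", "e", "i", "o", "u", "y"}
--     n, m = len(source), len(pattern)
--     if m > n: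
--         return 0
--     tbl = {ord(c): "1" if c in vowels else "0" for c in set(source)}
--     bits = source.translate(tbl)            # bits[i] == '1'  iff  source[i] is a vowel
--     src_bits = int("0" + bits[::-1], 2)     # bit i of src_bits = that class bit
--     tbl_v = {ord(c): "1" if c == "0" else "0" for c in set(pattern)}
--     tbl_c = {ord(c): "1" if c == "1" else "0" for c in set(pattern)}
--     need_v = int("0" + pattern.translate(tbl_v)[::-1], 2)
--     need_c = int("0" + pattern.translate(tbl_c)[::-1], 2)
--     full = (1 << m) - 1
--     high = 1 << m
--     w = src_bits & full                     # the m class bits of the current window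
--     count = 0
--     for t in range(n - m + 1):
--         if (w & need_v) == need_v and (w & need_c) == 0:
--             count += 1
--         nxt = t + m
--         if nxt < n and bits[nxt] == "1":
--             w |= high
--         w >>= 1
--     return count
-- ===== Notes on version B (the rewrite author's own statement) =====
-- stated objective: faster
-- what changed: B replaces A's per-window character rescan by a bit-parallel window test: source is translated once into a vowel/consonant bitstring packed into one big integer and the pattern is compiled once into 'must be vowel'/'must be consonant' bitmasks, so each window is decided by two whole-mask integer comparisons instead of a per-character loop.
import Mathlib
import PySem

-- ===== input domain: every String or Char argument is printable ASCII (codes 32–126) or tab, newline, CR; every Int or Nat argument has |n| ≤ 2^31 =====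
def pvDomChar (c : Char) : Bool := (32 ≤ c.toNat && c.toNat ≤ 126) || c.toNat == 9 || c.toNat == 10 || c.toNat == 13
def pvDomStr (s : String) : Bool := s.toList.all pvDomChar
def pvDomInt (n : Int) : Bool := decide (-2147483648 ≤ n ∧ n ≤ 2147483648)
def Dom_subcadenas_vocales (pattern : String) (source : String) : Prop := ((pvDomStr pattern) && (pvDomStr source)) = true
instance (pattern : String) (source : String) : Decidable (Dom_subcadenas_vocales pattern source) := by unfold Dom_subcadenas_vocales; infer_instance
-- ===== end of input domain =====

-- B replaces A's per-window character rescan by a bit-parallel window test (source packed once into a class bit-integer, pattern compiled into two bitmasks, each window decided by two mask comparisons); proved to return the same count.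


-- ===== PORT A =====
def pvVocales : PySem.Set Char := PySem.Set.ofList ['a', 'e', 'i', 'o', 'u', 'y']

-- A's inner 'for j in range(len(pattern))' loop with its two breaks (returns the flag 'cumple')
def pvAInner (pattern source : String) (i : Int) : List Int → Bool
  | [] => true
  | j :: rest =>
      let letra := (PySem.Str.pyGet? source (i + j)).getD ' '   -- index always in range when A calls this
      let pj := (PySem.Str.pyGet? pattern j).getD ' '
      if pj == '0' && !(PySem.Set.contains pvVocales letra) then false
      else if pj == '1' && PySem.Set.contains pvVocales letra then false
      else pvAInner pattern source i rest

def subcadenas_vocales (pattern : String) (source : String) : Int :=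
  (PySem.List.pyRange 0 (PySem.Str.len source - PySem.Str.len pattern + 1) 1).foldl
    (fun contador i =>
      if pvAInner pattern source i (PySem.List.pyRange 0 (PySem.Str.len pattern) 1) then contador + 1
      else contador)
    0

-- ===== PORT B =====
-- bits = source.translate(tbl): tbl maps every character occurring in source to '1' (vowel) or '0' (consonant),
-- so translate is exactly this per-character map  [hand port, exact]
def pvBitsOf (s : List Char) : List Char :=
  s.map (fun c => if PySem.Set.contains pvVocales c then '1' else '0')

-- pattern.translate(tbl_b): '1' exactly at the characters equal to b, '0' elsewhere  [hand port, exact]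
def pvMaskOf (b : Char) (p : List Char) : List Char :=
  p.map (fun c => if c == b then '1' else '0')

-- int(s, 2) for a string of '0'/'1' digits  [hand port, exact on such strings]
def pvBin (l : List Char) : Nat :=
  l.foldl (fun a c => 2 * a + (if c == '1' then 1 else 0)) 0

def subcadenas_vocales_alt (pattern : String) (source : String) : Int :=
  let n := PySem.Str.len source
  let m := PySem.Str.len pattern
  if m > n then 0
  else
    let bits := pvBitsOf source.toList
    let srcBits := pvBin ('0' :: bits.reverse)
    let needV := pvBin ('0' :: (pvMaskOf '0' pattern.toList).reverse)
    let needC := pvBin ('0' :: (pvMaskOf '1' pattern.toList).reverse)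
    let full := (1 <<< m.toNat) - 1
    let high := 1 <<< m.toNat
    let r := (PySem.List.pyRange 0 (n - m + 1) 1).foldl
      (fun (wc : Nat × Int) (t : Int) =>
        let cnt := if wc.1 &&& needV = needV ∧ wc.1 &&& needC = 0 then wc.2 + 1 else wc.2
        let w1 := if t + m < n ∧ (bits.getD (t + m).toNat ' ') == '1' then wc.1 ||| high else wc.1
        (w1 >>> 1, cnt))
      (srcBits &&& full, (0 : Int))
    r.2

-- ===== PRECONDITION & SPEC =====
def Spec_subcadenas_vocales (pattern : String) (source : String) (out : Int) : Prop := out = subcadenas_vocales_alt pattern source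
instance (pattern : String) (source : String) (out : Int) : Decidable (Spec_subcadenas_vocales pattern source out) := by unfold Spec_subcadenas_vocales; infer_instance

-- ===== CLAIM (what is proved, stated in full; the proofs are below) =====
def Claim_equal_subcadenas_vocales : Prop := ∀ (pattern : String) (source : String), Dom_subcadenas_vocales pattern source → Spec_subcadenas_vocales pattern source (subcadenas_vocales pattern source)

-- ===== LEMMAS AND PROOFS =====

-- abstract specification pieces
def pvVowelList : List Char := ['a', 'e', 'i', 'o', 'u', 'y']
def pvIsV (c : Char) : Bool := pvVowelList.contains c
def pvMC (p : Char) (v : Bool) : Bool := if p = '0' then v else if p = '1' then !v else true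

/-- `pvMatch q s` : the class-pattern `q` matches the first `q.length` characters of `s`
    (false if `s` is too short). -/
def pvMatch : List Char → List Char → Bool
  | [], _ => true
  | _ :: _, [] => false
  | p :: ps, c :: cs => pvMC p (pvIsV c) && pvMatch ps cs

theorem pv_contains_eq (c : Char) : PySem.Set.contains pvVocales c = pvIsV c := rfl

theorem pvAInner_eq_all (pattern source : String) (i : Int) (js : List Int) :
    pvAInner pattern source i js =
      js.all (fun j => pvMC ((PySem.Str.pyGet? pattern j).getD ' ')
        (pvIsV ((PySem.Str.pyGet? source (i + j)).getD ' '))) := by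
  induction js with
  | nil => rfl
  | cons j rest ih =>
    simp only [pvAInner, List.all_cons, pv_contains_eq, ← ih]
    set pj := (PySem.Str.pyGet? pattern j).getD ' ' with hpj
    set v := pvIsV ((PySem.Str.pyGet? source (i + j)).getD ' ') with hv
    by_cases h0 : pj = '0' <;> by_cases h1 : pj = '1' <;> cases v <;>
      simp_all [pvMC]

theorem pv_all_range_eq_match (pat src : List Char) : ∀ (t : Nat), t + pat.length ≤ src.length →
    ((List.range pat.length).all
      (fun j => pvMC (pat.getD j ' ') (pvIsV (src.getD (t + j) ' ')))) =
      pvMatch pat (src.drop t) := by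
  induction pat with
  | nil => intro t h; simp [pvMatch]
  | cons p ps ih =>
    intro t h
    have ht : t < src.length := by simp at h; omega
    rw [List.drop_eq_getElem_cons ht]
    simp only [List.length_cons, List.range_succ_eq_map, List.all_cons, List.all_map,
      Function.comp_def, Nat.succ_eq_add_one, List.getD_cons_succ, pvMatch]
    have h1 : ((List.range ps.length).all
        (fun j => pvMC (ps.getD j ' ') (pvIsV (src.getD (t + (j + 1)) ' ')))) =
        ((List.range ps.length).all
        (fun j => pvMC (ps.getD j ' ') (pvIsV (src.getD ((t + 1) + j) ' ')))) := by
      apply List.all_congr rfl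
      intro j
      have he : t + (j + 1) = (t + 1) + j := by omega
      rw [he]
    rw [h1, ih (t + 1) (by simp at h ⊢; omega)]
    congr 1
    simp [List.getD_eq_getElem?_getD, ht]

theorem pvA_char (pattern source : String) :
    subcadenas_vocales pattern source =
      (((List.range (((source.toList.length : Int) - (pattern.toList.length : Int) + 1).toNat)).countP
        (fun t => pvMatch pattern.toList (source.toList.drop t))) : Int) := by
  unfold subcadenas_vocales
  rw [PySem.List.foldl_if_add_one]
  simp only [PySem.List.pyRange_one]
  rw [List.countP_map]
  simp only [PySem.Str.len_eq, sub_zero, zero_add]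
  congr 1
  apply List.countP_congr
  intro t ht
  have htK : t < (((source.toList.length : Int) - (pattern.toList.length : Int) + 1)).toNat := by
    simpa using ht
  have hbound : t + pattern.toList.length ≤ source.toList.length := by omega
  have key : ((fun (i : Int) =>
      pvAInner pattern source i (List.map (fun (k : Nat) => (k : Int)) (List.range ((pattern.toList.length : Int)).toNat))) ∘
        fun (k : Nat) => (k : Int)) t = pvMatch pattern.toList (List.drop t source.toList) := by
    simp only [Function.comp_apply]
    rw [pvAInner_eq_all]
    simp only [List.all_map, Function.comp_def, Int.toNat_natCast]
    rw [← pv_all_range_eq_match pattern.toList source.toList t hbound]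
    apply List.all_congr rfl
    intro j
    have h1 : PySem.Str.pyGet? pattern ((j : Int)) = pattern.toList[j]? := by simp
    have h2 : ((t : Int) + (j : Int)) = ((t + j : Nat) : Int) := by push_cast; ring
    rw [h1]
    simp only [PySem.Str.pyGet?_eq, PySem.Chars.pyGet?_eq_listPyGet?, h2,
      PySem.List.pyGet?_natCast, List.getD_eq_getElem?_getD]
  rw [key]

-- ===== B side =====

theorem pv_or_pow_bit (a s j : Nat) : (a ||| (1 <<< s)).testBit j = (a.testBit j || decide (j = s)) := by
  rw [Nat.testBit_or, Nat.one_shiftLeft, Nat.testBit_two_pow]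
  simp [eq_comm]

theorem pv_mem_eq (c : Char) : (c ∈ pvVocales) = (pvIsV c = true) := by
  apply propext
  constructor
  · intro h
    rw [← pv_contains_eq]
    exact (PySem.Set.contains_iff _ _).mpr h
  · intro h
    rw [← pv_contains_eq] at h
    exact (PySem.Set.contains_iff _ _).mp h

theorem pvBin_bits (l : List Char) : ∀ (k : Nat),
    (pvBin ('0' :: l.reverse)).testBit k = (decide (k < l.length) && (l.getD k ' ' == '1')) := by
  induction l with
  | nil => intro k; simp [pvBin]
  | cons x xs ih =>
    intro k
    have hsplit : ('0' :: (x :: xs).reverse) = ('0' :: xs.reverse) ++ [x] := by simp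
    have hval : pvBin ('0' :: (x :: xs).reverse)
        = 2 * pvBin ('0' :: xs.reverse) + (if x == '1' then 1 else 0) := by
      rw [hsplit]
      unfold pvBin
      rw [List.foldl_append]
      simp
    rw [hval]
    cases k with
    | zero =>
      have hb : (if x == '1' then 1 else 0) ≤ 1 := by split <;> omega
      rcases Nat.le_one_iff_eq_zero_or_eq_one.mp hb with h | h <;>
        · rw [h]
          simp [Nat.testBit_zero, List.getD_cons_zero]
          split at h <;> simp_all <;> omega
    | succ k' =>
      rw [Nat.testBit_add_one]
      have hdiv : (2 * pvBin ('0' :: xs.reverse) + (if x == '1' then 1 else 0)) / 2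
          = pvBin ('0' :: xs.reverse) := by
        split <;> omega
      rw [hdiv, ih k']
      simp [List.getD_cons_succ]

theorem pvSrcBits_bit (s : List Char) (k : Nat) :
    (pvBin ('0' :: (pvBitsOf s).reverse)).testBit k
      = (decide (k < s.length) && pvIsV (s.getD k ' ')) := by
  rw [pvBin_bits]
  unfold pvBitsOf
  by_cases hk : k < s.length
  · have : (s.map (fun c => if PySem.Set.contains pvVocales c then '1' else '0')).getD k ' '
        = (if pvIsV (s.getD k ' ') then '1' else '0') := by
      simp [List.getD_eq_getElem?_getD, List.getElem?_map, hk, pv_contains_eq,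
        List.getElem?_eq_getElem hk, pv_mem_eq]
    rw [this]
    rcases h : pvIsV (s.getD k ' ') <;> simp [hk, h]
  · simp [hk]

theorem pvMask_bit (b : Char) (p : List Char) (k : Nat) :
    (pvBin ('0' :: (pvMaskOf b p).reverse)).testBit k
      = (decide (k < p.length) && (p.getD k ' ' == b)) := by
  rw [pvBin_bits]
  unfold pvMaskOf
  by_cases hk : k < p.length
  · have : (p.map (fun c => if c == b then '1' else '0')).getD k ' '
        = (if p.getD k ' ' == b then '1' else '0') := by
      simp [List.getD_eq_getElem?_getD, List.getElem?_map, hk, List.getElem?_eq_getElem hk]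
    rw [this]
    rcases h : (p.getD k ' ' == b) <;> simp [hk, h]
  · simp [hk]

theorem pvWinTest (pat src : List Char) (t : Nat) (ht : t + pat.length ≤ src.length)
    (w nv nc : Nat)
    (hw : ∀ j, w.testBit j = (decide (j < pat.length) && pvIsV (src.getD (t + j) ' ')))
    (hnv : ∀ j, nv.testBit j = (decide (j < pat.length) && (pat.getD j ' ' == '0')))
    (hnc : ∀ j, nc.testBit j = (decide (j < pat.length) && (pat.getD j ' ' == '1'))) :
    (w &&& nv = nv ∧ w &&& nc = 0) ↔ pvMatch pat (src.drop t) = true := by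
  rw [← pv_all_range_eq_match pat src t ht, List.all_eq_true]
  constructor
  · rintro ⟨h1, h2⟩ j hj
    have hjm : j < pat.length := List.mem_range.mp hj
    have b1 : (w.testBit j && nv.testBit j) = nv.testBit j := by
      rw [← Nat.testBit_and, h1]
    have b2 : (w.testBit j && nc.testBit j) = false := by
      rw [← Nat.testBit_and, h2, Nat.zero_testBit]
    rw [hw, hnv] at b1
    rw [hw, hnc] at b2
    simp only [decide_eq_true_eq, hjm, decide_true, Bool.true_and] at b1 b2
    set p := pat.getD j ' ' with hp
    set v := pvIsV (src.getD (t + j) ' ') with hv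
    by_cases h0 : p = '0' <;> by_cases h1' : p = '1' <;>
      rcases hvv : v with _ | _ <;> simp_all [pvMC]
  · intro hall
    constructor
    · apply Nat.eq_of_testBit_eq
      intro j
      rw [Nat.testBit_and, hw, hnv]
      by_cases hjm : j < pat.length
      · have := hall j (List.mem_range.mpr hjm)
        simp only [decide_eq_true_eq] at this ⊢
        set p := pat.getD j ' ' with hp
        set v := pvIsV (src.getD (t + j) ' ') with hv
        by_cases h0 : p = '0' <;> rcases hvv : v with _ | _ <;> simp_all [pvMC, hjm]
      · simp [hjm]
    · apply Nat.eq_of_testBit_eq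
      intro j
      rw [Nat.testBit_and, hw, hnc, Nat.zero_testBit]
      by_cases hjm : j < pat.length
      · have := hall j (List.mem_range.mpr hjm)
        simp only [decide_eq_true_eq] at this ⊢
        set p := pat.getD j ' ' with hp
        set v := pvIsV (src.getD (t + j) ' ') with hv
        by_cases h1' : p = '1' <;> rcases hvv : v with _ | _ <;> simp_all [pvMC, hjm]
      · simp [hjm]

theorem pvIncoming (src : List Char) (i : Nat) :
    pvIsV (src.getD i ' ')
      = (decide (i < src.length) && ((pvBitsOf src).getD i ' ' == '1')) := by
  by_cases hi : i < src.length
  · have : (pvBitsOf src).getD i ' ' = (if pvIsV (src.getD i ' ') then '1' else '0') := by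
      unfold pvBitsOf
      simp [List.getD_eq_getElem?_getD, List.getElem?_map, hi, pv_contains_eq,
        List.getElem?_eq_getElem hi, pv_mem_eq]
    rw [this]
    rcases h : pvIsV (src.getD i ' ') <;> simp [hi, h]
  · have hge : src.length ≤ i := by omega
    have : src.getD i ' ' = ' ' := by
      rw [List.getD_eq_getElem?_getD, List.getElem?_eq_none hge]
      rfl
    rw [this]
    simp [hi, pvIsV, pvVowelList]

theorem pvStepW (pat src : List Char) (t : Nat) (w high : Nat)
    (hhigh : high = 1 <<< pat.length)
    (hw : ∀ j, w.testBit j = (decide (j < pat.length) && pvIsV (src.getD (t + j) ' '))) (j : Nat) :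
    (((if (t + pat.length < src.length ∧ ((pvBitsOf src).getD (t + pat.length) ' ') == '1')
        then w ||| high else w) >>> 1)).testBit j
      = (decide (j < pat.length) && pvIsV (src.getD (t + 1 + j) ' ')) := by
  have hc : (t + pat.length < src.length ∧ ((pvBitsOf src).getD (t + pat.length) ' ') == '1')
      ↔ pvIsV (src.getD (t + pat.length) ' ') = true := by
    rw [pvIncoming src (t + pat.length)]
    simp
  have hbody : (if (t + pat.length < src.length ∧ ((pvBitsOf src).getD (t + pat.length) ' ') == '1')
        then w ||| high else w).testBit (1 + j)
      = (w.testBit (1 + j) || (pvIsV (src.getD (t + pat.length) ' ') && decide (1 + j = pat.length))) := by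
    split
    · rename_i h
      rw [hhigh, pv_or_pow_bit]
      rw [hc] at h
      rw [h]
      simp
    · rename_i h
      rw [hc] at h
      simp only [Bool.not_eq_true] at h
      rw [h]
      simp
  rw [Nat.testBit_shiftRight, hbody, hw]
  rcases Nat.lt_trichotomy (1 + j) pat.length with hlt | heq | hgt
  · have e1 : decide (1 + j < pat.length) = true := decide_eq_true hlt
    have e2 : decide (1 + j = pat.length) = false := decide_eq_false (by omega)
    have e3 : decide (j < pat.length) = true := decide_eq_true (by omega)
    have e4 : t + (1 + j) = t + 1 + j := by omega
    rw [e1, e2, e3, e4]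
    simp
  · have e1 : decide (1 + j < pat.length) = false := decide_eq_false (by omega)
    have e2 : decide (1 + j = pat.length) = true := decide_eq_true heq
    have e3 : decide (j < pat.length) = true := decide_eq_true (by omega)
    have e4 : t + pat.length = t + 1 + j := by omega
    rw [e1, e2, e3, e4]
    simp
  · have e1 : decide (1 + j < pat.length) = false := decide_eq_false (by omega)
    have e2 : decide (1 + j = pat.length) = false := decide_eq_false (by omega)
    have e3 : decide (j < pat.length) = false := decide_eq_false (by omega)
    rw [e1, e2, e3]
    simp

theorem pvLoopW (pat src : List Char) (nv nc high : Nat)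
    (hhigh : high = 1 <<< pat.length)
    (hnv : ∀ j, nv.testBit j = (decide (j < pat.length) && (pat.getD j ' ' == '0')))
    (hnc : ∀ j, nc.testBit j = (decide (j < pat.length) && (pat.getD j ' ' == '1'))) :
    ∀ (k t : Nat) (w : Nat) (cnt : Int),
    t + k ≤ src.length - pat.length + 1 → pat.length ≤ src.length →
    (∀ j, w.testBit j = (decide (j < pat.length) && pvIsV (src.getD (t + j) ' '))) →
    ((List.range' t k).foldl
      (fun (wc : Nat × Int) (u : Nat) =>
        let cnt' := if wc.1 &&& nv = nv ∧ wc.1 &&& nc = 0 then wc.2 + 1 else wc.2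
        let w1 := if (u + pat.length < src.length ∧ ((pvBitsOf src).getD (u + pat.length) ' ') == '1')
          then wc.1 ||| high else wc.1
        (w1 >>> 1, cnt')) (w, cnt)).2
    = cnt + (((List.range' t k).countP (fun u => pvMatch pat (src.drop u))) : Int) := by
  intro k
  induction k with
  | zero => intro t w cnt _ _ _; simp
  | succ k' ih =>
    intro t w cnt hbound hmn hw
    have ht : t + pat.length ≤ src.length := by omega
    rw [List.range'_succ, List.foldl_cons, List.countP_cons]
    have hwin : (decide (w &&& nv = nv ∧ w &&& nc = 0)) = pvMatch pat (src.drop t) := by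
      rcases h : pvMatch pat (src.drop t) with _ | _
      · apply decide_eq_false
        intro hcontra
        rw [(pvWinTest pat src t ht w nv nc hw hnv hnc)] at hcontra
        rw [h] at hcontra
        exact Bool.false_ne_true hcontra
      · exact decide_eq_true ((pvWinTest pat src t ht w nv nc hw hnv hnc).mpr h)
    have hres := ih (t + 1)
      ((if (t + pat.length < src.length ∧ ((pvBitsOf src).getD (t + pat.length) ' ') == '1')
        then w ||| high else w) >>> 1)
      (if w &&& nv = nv ∧ w &&& nc = 0 then cnt + 1 else cnt)
      (by omega) hmn (pvStepW pat src t w high hhigh hw)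
    simp only at hres ⊢
    rw [hres]
    rcases h : pvMatch pat (src.drop t) with _ | _
    · have hng : ¬ (w &&& nv = nv ∧ w &&& nc = 0) := by
        apply of_decide_eq_false
        rw [hwin, h]
      rw [if_neg hng]
      simp [h]
    · have hok : (w &&& nv = nv ∧ w &&& nc = 0) := by
        apply of_decide_eq_true
        rw [hwin, h]
      rw [if_pos hok]
      simp [h]
      push_cast
      ring

theorem pvB_char (pattern source : String) :
    subcadenas_vocales_alt pattern source =
      (((List.range (((source.toList.length : Int) - (pattern.toList.length : Int) + 1).toNat)).countP
        (fun t => pvMatch pattern.toList (source.toList.drop t))) : Int) := by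
  unfold subcadenas_vocales_alt
  simp only [PySem.Str.len_eq]
  set pat := pattern.toList with hpatdef
  set src := source.toList with hsrcdef
  by_cases hmn : pat.length ≤ src.length
  · rw [if_neg (by push_cast; omega)]
    set n := src.length with hn
    set m := pat.length with hm
    have hWnat : (((n : Int) - (m : Int) + 1)).toNat = n - m + 1 := by omega
    have hmtoNat : ((m : Int)).toNat = m := by omega
    have hnv := pvMask_bit '0' pat
    have hnc := pvMask_bit '1' pat
    -- the initial window state
    have hw0 : ∀ j, ((pvBin ('0' :: (pvBitsOf src).reverse)) &&& ((1 <<< ((m : Int)).toNat) - 1)).testBit j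
        = (decide (j < m) && pvIsV (src.getD (0 + j) ' ')) := by
      intro j
      rw [Nat.testBit_and, pvSrcBits_bit, hmtoNat, Nat.one_shiftLeft,
        Nat.testBit_two_pow_sub_one]
      by_cases hj : j < m
      · have hjn : j < n := by omega
        have e1 : decide (j < m) = true := decide_eq_true hj
        have e2 : decide (j < n) = true := decide_eq_true hjn
        rw [e1, e2]
        simp
      · have e0 : decide (j < m) = false := decide_eq_false hj
        rw [e0]
        simp
    -- the Int-indexed loop body equals the Nat-indexed one
    have hfun : ∀ (wc : Nat × Int) (u : Nat),
        (fun (wc : Nat × Int) (t : Int) =>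
          let cnt := if wc.1 &&& pvBin ('0' :: (pvMaskOf '0' pat).reverse) = pvBin ('0' :: (pvMaskOf '0' pat).reverse)
              ∧ wc.1 &&& pvBin ('0' :: (pvMaskOf '1' pat).reverse) = 0 then wc.2 + 1 else wc.2
          let w1 := if t + (m : Int) < (n : Int) ∧ ((pvBitsOf src).getD (t + (m : Int)).toNat ' ') == '1'
            then wc.1 ||| (1 <<< ((m : Int)).toNat) else wc.1
          (w1 >>> 1, cnt)) wc ((u : Nat) : Int)
        = (fun (wc : Nat × Int) (u : Nat) =>
          let cnt' := if wc.1 &&& pvBin ('0' :: (pvMaskOf '0' pat).reverse) = pvBin ('0' :: (pvMaskOf '0' pat).reverse)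
              ∧ wc.1 &&& pvBin ('0' :: (pvMaskOf '1' pat).reverse) = 0 then wc.2 + 1 else wc.2
          let w1 := if (u + m < n ∧ ((pvBitsOf src).getD (u + m) ' ') == '1')
            then wc.1 ||| (1 <<< ((m : Int)).toNat) else wc.1
          (w1 >>> 1, cnt')) wc u := by
      intro wc u
      have h1 : (((u : Nat) : Int) + (m : Int)).toNat = u + m := by omega
      have h2 : (((u : Nat) : Int) + (m : Int) < (n : Int)) ↔ (u + m < n) := by omega
      simp only [h1, h2]
    have hloop := pvLoopW pat src
      (pvBin ('0' :: (pvMaskOf '0' pat).reverse)) (pvBin ('0' :: (pvMaskOf '1' pat).reverse))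
      (1 <<< ((m : Int)).toNat) (by rw [hmtoNat]) hnv hnc
      (n - m + 1) 0
      ((pvBin ('0' :: (pvBitsOf src).reverse)) &&& ((1 <<< ((m : Int)).toNat) - 1)) 0
      (by omega) hmn hw0
    simp only [PySem.List.pyRange_one, sub_zero, zero_add, hWnat]
    have hfeq : (fun (wc : Nat × Int) (u : Nat) =>
        (fun (wc : Nat × Int) (t : Int) =>
          let cnt := if wc.1 &&& pvBin ('0' :: (pvMaskOf '0' pat).reverse) = pvBin ('0' :: (pvMaskOf '0' pat).reverse)
              ∧ wc.1 &&& pvBin ('0' :: (pvMaskOf '1' pat).reverse) = 0 then wc.2 + 1 else wc.2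
          let w1 := if t + (m : Int) < (n : Int) ∧ ((pvBitsOf src).getD (t + (m : Int)).toNat ' ') == '1'
            then wc.1 ||| (1 <<< ((m : Int)).toNat) else wc.1
          (w1 >>> 1, cnt)) wc ((u : Nat) : Int))
        = (fun (wc : Nat × Int) (u : Nat) =>
          let cnt' := if wc.1 &&& pvBin ('0' :: (pvMaskOf '0' pat).reverse) = pvBin ('0' :: (pvMaskOf '0' pat).reverse)
              ∧ wc.1 &&& pvBin ('0' :: (pvMaskOf '1' pat).reverse) = 0 then wc.2 + 1 else wc.2
          let w1 := if (u + m < n ∧ ((pvBitsOf src).getD (u + m) ' ') == '1')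
            then wc.1 ||| (1 <<< ((m : Int)).toNat) else wc.1
          (w1 >>> 1, cnt')) := by
      funext wc u
      exact hfun wc u
    rw [List.foldl_map, List.range_eq_range']
    rw [hfeq]
    rw [hloop]
    rw [← List.range_eq_range']
    simp
  · rw [if_pos (by push_cast; omega)]
    have hW0 : (((src.length : Int) - (pat.length : Int) + 1)).toNat = 0 := by omega
    rw [hW0]
    simp

-- ===== VERDICT (by name: the statement is the Claim_ definition above) =====
theorem subcadenas_vocales_spec : Claim_equal_subcadenas_vocales := by
  intro pattern source _
  unfold Spec_subcadenas_vocales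
  rw [pvA_char, pvB_char]
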